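-- pv_equiv track=rewrite | github.com/WojtowiczZuzanna/zadania | 12_py/mock2/p1.py | f
-- ===== SOURCE A (Python) =====
-- def f(n):
--     check = []
--     odd = []
--     even = []
--     sn = str(n)
--
--     for number in sn:
--         check.append(int(number))
--
--     for number in sn:
--         number = int(number)
--         if number%2 == 0:
--             even.append(number)
--         else:
--             odd.append(number)
--
--     if odd == []:
--         return -1
--     else:
--         return max(odd) - min(odd)
-- ===== SOURCE B (Python) =====
-- def f(n):
--     # Digit-presence table then a fixed scan over the odd values; int(ch) kept per char
--     # so non-digit characters (e.g. '-' of a negative n) still raise ValueError like A.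
--     present = [False] * 10
--     for ch in str(n):
--         present[int(ch)] = True
--     lo = -1
--     hi = -1
--     for v in (1, 3, 5, 7, 9):
--         if present[v]:
--             if lo == -1:
--                 lo = v
--             hi = v
--     if lo == -1:
--         return -1
--     return hi - lo
-- ===== Notes on version B (the rewrite author's own statement) =====
-- stated objective: alternative
-- what changed: Instead of collecting odd digits into a list and calling max/min on it, B records digit presence in a size-10 boolean table in one pass and then scans only the five odd values 1,3,5,7,9 tracking the smallest and largest present.
import Mathlib
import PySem

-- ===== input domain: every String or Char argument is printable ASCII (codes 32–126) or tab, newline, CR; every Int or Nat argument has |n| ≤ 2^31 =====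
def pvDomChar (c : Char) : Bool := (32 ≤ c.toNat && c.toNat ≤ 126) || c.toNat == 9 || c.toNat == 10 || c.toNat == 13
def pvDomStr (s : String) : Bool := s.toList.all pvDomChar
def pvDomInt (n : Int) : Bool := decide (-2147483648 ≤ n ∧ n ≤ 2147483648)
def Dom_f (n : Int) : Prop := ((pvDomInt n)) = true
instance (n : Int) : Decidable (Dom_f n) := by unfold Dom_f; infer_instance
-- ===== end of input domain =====

-- B replaces the odd-list + max/min of A by a digit-presence table and a fixed scan of the odd values (alternative decomposition, same cost).
-- ===== PORT A =====
-- int(ch) on a single char: none = ValueError (excluded by Pre_f); getD 0 is unreachable under Pre_f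
def pvDigit (c : Char) : Int := (PySem.Int.ofStr? (String.singleton c)).getD 0

def f (n : Int) : Int :=
  let sn := PySem.Int.toChars n
  let _check := sn.foldl (fun acc c => acc ++ [pvDigit c]) ([] : List Int)
  let eo := sn.foldl (fun (p : List Int × List Int) c =>
      if PySem.Int.mod (pvDigit c) 2 = 0 then (p.1 ++ [pvDigit c], p.2)
      else (p.1, p.2 ++ [pvDigit c])) (([] : List Int), ([] : List Int))
  -- max(odd)/min(odd) only reached when odd ≠ []; getD 0 unreachable
  if eo.2 = [] then -1
  else (PySem.List.max? eo.2 (fun x => x)).getD 0 - (PySem.List.min? eo.2 (fun x => x)).getD 0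

-- ===== PORT B =====
-- present[int(ch)] = True: index is always 0..9 (single digit char), so List.set at toNat is exact;
-- present[v] for literal v in 1..9 on the length-10 list is exact as getD
def f_alt (n : Int) : Int :=
  let present := (PySem.Int.toChars n).foldl
      (fun (p : List Bool) c => p.set (pvDigit c).toNat true) (List.replicate 10 false)
  let lh := [(1:Int),3,5,7,9].foldl (fun (s : Int × Int) v =>
      if present.getD v.toNat false then (if s.1 = -1 then (v, v) else (s.1, v)) else s)
      ((-1 : Int), (-1 : Int))
  if lh.1 = -1 then -1 else lh.2 - lh.1

-- ===== PRECONDITION & SPEC =====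
-- Pre_f excludes n < 0, where str(n) starts with '-' and int('-') raises ValueError in A (and in B).
def Pre_f (n : Int) : Prop := 0 ≤ n
instance (n : Int) : Decidable (Pre_f n) := by unfold Pre_f; infer_instance
def pvWitness_f : Int := 1379

def Spec_f (n : Int) (out : Int) : Prop := out = f_alt n
instance (n : Int) (out : Int) : Decidable (Spec_f n out) := by unfold Spec_f; infer_instance

-- ===== CLAIM =====
def Claim_equal_f : Prop := ∀ (n : Int), Dom_f n → Pre_f n → Spec_f n (f n)

-- ===== LEMMAS AND PROOFS =====
def IsDig (c : Char) : Prop := ∃ k : Nat, k < 10 ∧ c = Nat.digitChar k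

lemma tdc_mem (f : Nat) : ∀ (n : Nat) (acc : List Char), (∀ c ∈ acc, IsDig c) →
    ∀ c ∈ Nat.toDigitsCore 10 f n acc, IsDig c := by
  induction f with
  | zero => intro n acc hacc c hc; simpa [Nat.toDigitsCore] using hacc c (by simpa [Nat.toDigitsCore] using hc)
  | succ f ih =>
    intro n acc hacc c hc
    have hd : IsDig ((n % 10).digitChar) := ⟨n % 10, by omega, rfl⟩
    simp only [Nat.toDigitsCore] at hc
    by_cases h : n / 10 = 0
    · simp [h] at hc
      rcases hc with rfl | hc
      · exact hd
      · exact hacc c hc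
    · simp [h] at hc
      refine ih (n / 10) _ ?_ c hc
      intro d hd'
      rcases List.mem_cons.mp hd' with h' | h'
      · exact h' ▸ hd
      · exact hacc d h'

lemma toChars_digits (n : Int) (hn : 0 ≤ n) : ∀ c ∈ PySem.Int.toChars n, IsDig c := by
  intro c hc
  rw [PySem.Int.toChars, if_neg (by omega)] at hc
  exact tdc_mem _ _ [] (by simp) c hc

lemma digit_val_bounds (c : Char) (h : IsDig c) : 0 ≤ pvDigit c ∧ pvDigit c ≤ 9 := by
  obtain ⟨k, hk, rfl⟩ := h
  have : ∀ k : Nat, k < 10 → 0 ≤ pvDigit (Nat.digitChar k) ∧ pvDigit (Nat.digitChar k) ≤ 9 := by decide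
  exact this k hk

def oddsOf (ds : List Int) : List Int := ds.filter (fun x => !decide (PySem.Int.mod x 2 = 0))

-- A's partition loop
lemma fold_eo (sn : List Char) : ∀ (e o : List Int),
    sn.foldl (fun (p : List Int × List Int) c =>
      if PySem.Int.mod (pvDigit c) 2 = 0 then (p.1 ++ [pvDigit c], p.2)
      else (p.1, p.2 ++ [pvDigit c])) (e, o)
    = (e ++ (sn.map pvDigit).filter (fun x => decide (PySem.Int.mod x 2 = 0)),
       o ++ oddsOf (sn.map pvDigit)) := by
  induction sn with
  | nil => intro e o; simp [oddsOf]
  | cons c t ih =>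
    intro e o
    simp only [List.foldl_cons, List.map_cons, oddsOf, List.filter_cons]
    by_cases h : PySem.Int.mod (pvDigit c) 2 = 0
    · rw [if_pos h, ih (e ++ [pvDigit c]) o]
      have hd : (2:Int) ∣ pvDigit c := (PySem.Int.mod_eq_zero_iff_dvd _ _).mp h
      simp [oddsOf, hd]
    · rw [if_neg h, ih e (o ++ [pvDigit c])]
      have hnd : ¬ (2:Int) ∣ pvDigit c := fun hd => h ((PySem.Int.mod_eq_zero_iff_dvd _ _).mpr hd)
      have h1 : pvDigit c % 2 = 1 := by omega
      simp [oddsOf, hnd, h1]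

-- B's presence loop
lemma fold_present (sn : List Char) : ∀ (p : List Bool) (v : Nat), v < p.length →
    (sn.foldl (fun (p : List Bool) c => p.set (pvDigit c).toNat true) p).getD v false
    = (p.getD v false || sn.any (fun c => (pvDigit c).toNat == v)) := by
  induction sn with
  | nil => intro p v _; simp
  | cons c t ih =>
    intro p v hv
    simp only [List.foldl_cons, List.any_cons]
    rw [ih _ v (by simpa using hv)]
    by_cases h : (pvDigit c).toNat = v
    · subst h
      simp [List.getD_eq_getElem?_getD, List.getElem?_set, hv]
    · have hb : ((pvDigit c).toNat == v) = false := by simp [h]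
      simp [List.getD_eq_getElem?_getD, List.getElem?_set, h, Ne.symm h, hb]

lemma pyMax_eq (xs : List Int) (m : Int) (hm : m ∈ xs) (hle : ∀ y ∈ xs, y ≤ m) :
    PySem.List.max? xs (fun x => x) = some m := by
  cases h : PySem.List.max? xs (fun x => x) with
  | none => rw [PySem.List.max?_eq_none_iff] at h; subst h; cases hm
  | some m' =>
    have h1 := PySem.List.max?_mem h
    have h2 := PySem.List.max?_isMax h
    exact congrArg some (le_antisymm (hle m' h1) (h2 m hm))

lemma pyMin_eq (xs : List Int) (m : Int) (hm : m ∈ xs) (hle : ∀ y ∈ xs, m ≤ y) :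
    PySem.List.min? xs (fun x => x) = some m := by
  cases h : PySem.List.min? xs (fun x => x) with
  | none => rw [PySem.List.min?_eq_none_iff] at h; subst h; cases hm
  | some m' =>
    have h1 := PySem.List.min?_mem h
    have h2 := PySem.List.min?_isMin h
    exact congrArg some (le_antisymm (h2 m hm) (hle m' h1))

lemma odd_mem (ds : List Int) (v : Int) (hv : v = 1 ∨ v = 3 ∨ v = 5 ∨ v = 7 ∨ v = 9) :
    v ∈ oddsOf ds ↔ v ∈ ds := by
  rw [oddsOf, List.mem_filter]
  constructor
  · exact fun h => h.1
  · intro h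
    refine ⟨h, ?_⟩
    rcases hv with rfl | rfl | rfl | rfl | rfl <;> decide
lemma odds_sub (ds : List Int) (hb : ∀ x ∈ ds, 0 ≤ x ∧ x ≤ 9) :
    ∀ x ∈ oddsOf ds, x = 1 ∨ x = 3 ∨ x = 5 ∨ x = 7 ∨ x = 9 := by
  intro x hx
  rw [oddsOf, List.mem_filter] at hx
  obtain ⟨h1, h2⟩ := hx
  obtain ⟨hl, hr⟩ := hb x h1
  interval_cases x <;> simp_all <;> exact h2 (by decide)

-- the common specification value as a function of odd-digit membership
def pvSpec (ds : List Int) : Int :=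
  if (1:Int) ∉ ds ∧ (3:Int) ∉ ds ∧ (5:Int) ∉ ds ∧ (7:Int) ∉ ds ∧ (9:Int) ∉ ds then -1
  else (if (9:Int) ∈ ds then 9 else if (7:Int) ∈ ds then 7 else if (5:Int) ∈ ds then 5
        else if (3:Int) ∈ ds then 3 else 1)
     - (if (1:Int) ∈ ds then 1 else if (3:Int) ∈ ds then 3 else if (5:Int) ∈ ds then 5
        else if (7:Int) ∈ ds then 7 else 9)

lemma odds_empty_iff (ds : List Int) (hb : ∀ x ∈ ds, 0 ≤ x ∧ x ≤ 9) :
    oddsOf ds = [] ↔ ((1:Int) ∉ ds ∧ (3:Int) ∉ ds ∧ (5:Int) ∉ ds ∧ (7:Int) ∉ ds ∧ (9:Int) ∉ ds) := by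
  constructor
  · intro h
    refine ⟨?_, ?_, ?_, ?_, ?_⟩ <;>
      · intro hm
        have := (odd_mem ds _ (by tauto)).mpr hm
        rw [h] at this; cases this
  · intro ⟨h1, h3, h5, h7, h9⟩
    rw [List.eq_nil_iff_forall_not_mem]
    intro x hx
    rcases odds_sub ds hb x hx with rfl | rfl | rfl | rfl | rfl
    · exact h1 ((odd_mem ds 1 (by tauto)).mp hx)
    · exact h3 ((odd_mem ds 3 (by tauto)).mp hx)
    · exact h5 ((odd_mem ds 5 (by tauto)).mp hx)
    · exact h7 ((odd_mem ds 7 (by tauto)).mp hx)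
    · exact h9 ((odd_mem ds 9 (by tauto)).mp hx)

lemma a_eq_spec (ds : List Int) (hb : ∀ x ∈ ds, 0 ≤ x ∧ x ≤ 9) :
    (if oddsOf ds = [] then (-1 : Int)
     else (PySem.List.max? (oddsOf ds) (fun x => x)).getD 0
        - (PySem.List.min? (oddsOf ds) (fun x => x)).getD 0) = pvSpec ds := by
  by_cases he : oddsOf ds = []
  · rw [if_pos he, pvSpec, if_pos ((odds_empty_iff ds hb).mp he)]
  · rw [if_neg he, pvSpec, if_neg (fun h => he ((odds_empty_iff ds hb).mpr h))]
    have hmem : ∀ v : Int, (v = 1 ∨ v = 3 ∨ v = 5 ∨ v = 7 ∨ v = 9) → v ∈ ds → v ∈ oddsOf ds :=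
      fun v hv hm => (odd_mem ds v hv).mpr hm
    have hnm : ∀ v : Int, (v = 1 ∨ v = 3 ∨ v = 5 ∨ v = 7 ∨ v = 9) → v ∉ ds → v ∉ oddsOf ds :=
      fun v hv hm h => hm ((odd_mem ds v hv).mp h)
    have hmax : (PySem.List.max? (oddsOf ds) (fun x => x)).getD 0
        = (if (9:Int) ∈ ds then 9 else if (7:Int) ∈ ds then 7 else if (5:Int) ∈ ds then 5
           else if (3:Int) ∈ ds then 3 else 1) := by
      by_cases m9 : (9:Int) ∈ ds
      · rw [pyMax_eq _ 9 (hmem 9 (by tauto) m9)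
          (fun y hy => by rcases odds_sub ds hb y hy with rfl|rfl|rfl|rfl|rfl <;> omega)]
        simp [m9]
      · by_cases m7 : (7:Int) ∈ ds
        · rw [pyMax_eq _ 7 (hmem 7 (by tauto) m7) (fun y hy => by
            rcases odds_sub ds hb y hy with rfl|rfl|rfl|rfl|rfl
            · omega
            · omega
            · omega
            · omega
            · exact absurd hy (hnm 9 (by tauto) m9))]
          simp [m9, m7]
        · by_cases m5 : (5:Int) ∈ ds
          · rw [pyMax_eq _ 5 (hmem 5 (by tauto) m5) (fun y hy => by
              rcases odds_sub ds hb y hy with rfl|rfl|rfl|rfl|rfl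
              · omega
              · omega
              · omega
              · exact absurd hy (hnm 7 (by tauto) m7)
              · exact absurd hy (hnm 9 (by tauto) m9))]
            simp [m9, m7, m5]
          · by_cases m3 : (3:Int) ∈ ds
            · rw [pyMax_eq _ 3 (hmem 3 (by tauto) m3) (fun y hy => by
                rcases odds_sub ds hb y hy with rfl|rfl|rfl|rfl|rfl
                · omega
                · omega
                · exact absurd hy (hnm 5 (by tauto) m5)
                · exact absurd hy (hnm 7 (by tauto) m7)
                · exact absurd hy (hnm 9 (by tauto) m9))]
              simp [m9, m7, m5, m3]
            · have m1 : (1:Int) ∈ ds := by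
                by_contra m1
                exact he ((odds_empty_iff ds hb).mpr ⟨m1, m3, m5, m7, m9⟩)
              rw [pyMax_eq _ 1 (hmem 1 (by tauto) m1) (fun y hy => by
                rcases odds_sub ds hb y hy with rfl|rfl|rfl|rfl|rfl
                · omega
                · exact absurd hy (hnm 3 (by tauto) m3)
                · exact absurd hy (hnm 5 (by tauto) m5)
                · exact absurd hy (hnm 7 (by tauto) m7)
                · exact absurd hy (hnm 9 (by tauto) m9))]
              simp [m9, m7, m5, m3, m1]
    have hmin : (PySem.List.min? (oddsOf ds) (fun x => x)).getD 0
        = (if (1:Int) ∈ ds then 1 else if (3:Int) ∈ ds then 3 else if (5:Int) ∈ ds then 5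
           else if (7:Int) ∈ ds then 7 else 9) := by
      by_cases m1 : (1:Int) ∈ ds
      · rw [pyMin_eq _ 1 (hmem 1 (by tauto) m1)
          (fun y hy => by rcases odds_sub ds hb y hy with rfl|rfl|rfl|rfl|rfl <;> omega)]
        simp [m1]
      · by_cases m3 : (3:Int) ∈ ds
        · rw [pyMin_eq _ 3 (hmem 3 (by tauto) m3) (fun y hy => by
            rcases odds_sub ds hb y hy with rfl|rfl|rfl|rfl|rfl
            · exact absurd hy (hnm 1 (by tauto) m1)
            · omega
            · omega
            · omega
            · omega)]
          simp [m1, m3]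
        · by_cases m5 : (5:Int) ∈ ds
          · rw [pyMin_eq _ 5 (hmem 5 (by tauto) m5) (fun y hy => by
              rcases odds_sub ds hb y hy with rfl|rfl|rfl|rfl|rfl
              · exact absurd hy (hnm 1 (by tauto) m1)
              · exact absurd hy (hnm 3 (by tauto) m3)
              · omega
              · omega
              · omega)]
            simp [m1, m3, m5]
          · by_cases m7 : (7:Int) ∈ ds
            · rw [pyMin_eq _ 7 (hmem 7 (by tauto) m7) (fun y hy => by
                rcases odds_sub ds hb y hy with rfl|rfl|rfl|rfl|rfl
                · exact absurd hy (hnm 1 (by tauto) m1)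
                · exact absurd hy (hnm 3 (by tauto) m3)
                · exact absurd hy (hnm 5 (by tauto) m5)
                · omega
                · omega)]
              simp [m1, m3, m5, m7]
            · have m9 : (9:Int) ∈ ds := by
                by_contra m9
                exact he ((odds_empty_iff ds hb).mpr ⟨m1, m3, m5, m7, m9⟩)
              rw [pyMin_eq _ 9 (hmem 9 (by tauto) m9) (fun y hy => by
                rcases odds_sub ds hb y hy with rfl|rfl|rfl|rfl|rfl
                · exact absurd hy (hnm 1 (by tauto) m1)
                · exact absurd hy (hnm 3 (by tauto) m3)
                · exact absurd hy (hnm 5 (by tauto) m5)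
                · exact absurd hy (hnm 7 (by tauto) m7)
                · omega)]
              simp [m1, m3, m5, m7, m9]
    rw [hmax, hmin]

lemma present_mem (sn : List Char) (hd : ∀ c ∈ sn, IsDig c) (v : Nat) (hv : v < 10) :
    ((sn.foldl (fun (p : List Bool) c => p.set (pvDigit c).toNat true) (List.replicate 10 false)).getD v false)
    = decide ((v : Int) ∈ sn.map pvDigit) := by
  rw [fold_present sn _ v (by simpa using hv)]
  have hrep : (List.replicate 10 false).getD v false = false := by
    rw [List.getD_eq_getElem?_getD, List.getElem?_replicate, if_pos hv]
    rfl
  rw [hrep, Bool.false_or]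
  by_cases h : (v : Int) ∈ sn.map pvDigit
  · simp only [h, decide_true]
    rw [List.mem_map] at h
    obtain ⟨c, hc, hval⟩ := h
    have hb := digit_val_bounds c (hd c hc)
    exact List.any_eq_true.mpr ⟨c, hc, by simp only [beq_iff_eq]; omega⟩
  · simp only [h, decide_false]
    rw [List.any_eq_false]
    intro c hc
    simp only [beq_iff_eq]
    intro hval
    have hb := digit_val_bounds c (hd c hc)
    exact h (List.mem_map.mpr ⟨c, hc, by omega⟩)

lemma b_eq_spec (ds : List Int) (pr : List Bool)
    (h1 : pr.getD (1:Int).toNat false = decide ((1:Int) ∈ ds))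
    (h3 : pr.getD (3:Int).toNat false = decide ((3:Int) ∈ ds))
    (h5 : pr.getD (5:Int).toNat false = decide ((5:Int) ∈ ds))
    (h7 : pr.getD (7:Int).toNat false = decide ((7:Int) ∈ ds))
    (h9 : pr.getD (9:Int).toNat false = decide ((9:Int) ∈ ds)) :
    (let lh := [(1:Int),3,5,7,9].foldl (fun (s : Int × Int) v =>
        if pr.getD v.toNat false then (if s.1 = -1 then (v, v) else (s.1, v)) else s)
        ((-1 : Int), (-1 : Int));
     if lh.1 = -1 then (-1:Int) else lh.2 - lh.1) = pvSpec ds := by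
  simp only [List.getD_eq_getElem?_getD, Int.toNat_one, show Int.toNat 3 = 3 from rfl, show Int.toNat 5 = 5 from rfl, show Int.toNat 7 = 7 from rfl, show Int.toNat 9 = 9 from rfl] at h1 h3 h5 h7 h9
  by_cases m1 : (1:Int) ∈ ds <;> by_cases m3 : (3:Int) ∈ ds <;> by_cases m5 : (5:Int) ∈ ds <;>
    by_cases m7 : (7:Int) ∈ ds <;> by_cases m9 : (9:Int) ∈ ds <;>
    simp [pvSpec, h1, h3, h5, h7, h9, m1, m3, m5, m7, m9]

theorem f_spec_aux : ∀ (n : Int), Dom_f n → Pre_f n → f n = f_alt n := by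
  intro n _ hn
  have hdig := toChars_digits n hn
  have hb : ∀ x ∈ (PySem.Int.toChars n).map pvDigit, 0 ≤ x ∧ x ≤ 9 := by
    intro x hx
    rw [List.mem_map] at hx
    obtain ⟨c, hc, rfl⟩ := hx
    exact digit_val_bounds c (hdig c hc)
  set sn := PySem.Int.toChars n with hsn
  set ds := sn.map pvDigit with hds
  have hA : f n = (if oddsOf ds = [] then (-1:Int)
      else (PySem.List.max? (oddsOf ds) (fun x => x)).getD 0
         - (PySem.List.min? (oddsOf ds) (fun x => x)).getD 0) := by
    rw [f]
    rw [show PySem.Int.toChars n = sn from rfl]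
    rw [fold_eo sn [] []]
    simp [hds]
  have hpm : ∀ v : Nat, v < 10 →
      ((sn.foldl (fun (p : List Bool) c => p.set (pvDigit c).toNat true)
        (List.replicate 10 false)).getD v false) = decide ((v : Int) ∈ ds) :=
    fun v hv => present_mem sn hdig v hv
  have hB : f_alt n = pvSpec ds := by
    rw [f_alt]
    rw [show PySem.Int.toChars n = sn from rfl]
    exact b_eq_spec ds _
      (by simpa using hpm 1 (by norm_num))
      (by simpa using hpm 3 (by norm_num))
      (by simpa using hpm 5 (by norm_num))
      (by simpa using hpm 7 (by norm_num))
      (by simpa using hpm 9 (by norm_num))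
  rw [hA, hB]
  exact a_eq_spec ds hb

-- ===== VERDICT =====
theorem f_spec : Claim_equal_f := by
  intro n hd hp
  exact f_spec_aux n hd hp
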